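-- pv_equiv track=rewrite | github.com/ChoiHeon/algorithm | 02_백준/Acka.py | solution
-- ===== SOURCE A (Python) =====
-- def solution(s, a, b, c):
--     if s > a+b+c:
--         return 0
--
--     # f[k] = k!, 0!은 1로 가정
--     f = [1] * (s+1)
--     for i in range(2, s+1):
--         f[i] = i * f[i-1]
--
--     # comb(n, r) = nCr
--     def comb(n, r):
--         return f[n] // f[r] // f[n-r]
--
--     # dp[k] = 가수가 할당되지 않은 곡이 k개 이상인 경우의 수, k < s
--     # dp[i] = ((jCa * jCb * jCc) * sCj) - dp[i+1], j = s-i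
--     dp = [0] * (s+1)
--     for i in range(s-max(a, b, c), 0, -1):
--         j = s-i
--         dp[i] += comb(j, a)
--         dp[i] *= comb(j, b)
--         dp[i] *= comb(j, c)
--         dp[i] *= comb(s, j)
--         dp[i] -= dp[i+1]
--
--     # 해 = (가수가 배정될 수 있는 모든 경우의 수)
--     #      - (가수가 할당되지 않은 곡이 1개 이상인 경우의 수)
--     answer = comb(s, a) * comb(s, b) * comb(s, c)
--     answer -= dp[1]
--     return answer % 1000000007
-- ===== SOURCE B (Python) =====
-- def solution(s, a, b, c):
--     if s > a + b + c:
--         return 0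
--     m = max(a, b, c)
--     # binomials at j = s, built multiplicatively (no factorial table)
--     ca, cb, cc = 1, 1, 1
--     for t in range(a):
--         ca = ca * (s - t) // (t + 1)
--     for t in range(b):
--         cb = cb * (s - t) // (t + 1)
--     for t in range(c):
--         cc = cc * (s - t) // (t + 1)
--     cs = 1  # C(s, j) at j = s
--     total, sign, j = 0, 1, s
--     while True:
--         total += sign * cs * ca * cb * cc
--         if j == m:
--             break
--         cs = cs * j // (s - j + 1)
--         ca = ca * (j - a) // j
--         cb = cb * (j - b) // j
--         cc = cc * (j - c) // j
--         sign, j = -sign, j - 1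
--     return total % 1000000007
-- ===== Notes on version B (the rewrite author's own statement) =====
-- stated objective: alternative
-- what changed: B removes A's factorial table, comb helper and dp array: it maintains the four binomial coefficients as running products updated by exact multiplicative steps (C(s,j-1)=C(s,j)*j//(s-j+1), C(j-1,x)=C(j,x)*(j-x)//j) while a single countdown loop accumulates the alternating inclusion-exclusion sum directly.
import Mathlib
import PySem

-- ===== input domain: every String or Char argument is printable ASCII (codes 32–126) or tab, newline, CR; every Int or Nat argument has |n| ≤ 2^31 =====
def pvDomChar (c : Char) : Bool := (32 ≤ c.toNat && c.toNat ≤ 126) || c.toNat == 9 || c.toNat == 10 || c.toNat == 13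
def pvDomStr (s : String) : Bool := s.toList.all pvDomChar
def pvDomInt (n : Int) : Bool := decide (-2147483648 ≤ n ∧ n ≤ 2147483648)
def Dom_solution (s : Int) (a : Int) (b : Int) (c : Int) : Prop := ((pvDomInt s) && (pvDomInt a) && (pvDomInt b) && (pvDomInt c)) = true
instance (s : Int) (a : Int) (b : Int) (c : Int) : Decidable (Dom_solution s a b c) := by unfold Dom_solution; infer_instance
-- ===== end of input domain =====

-- B drops A's factorial table, comb helper and dp array entirely: it maintains the four binomial
-- coefficients as running products (exact multiplicative updates with integer division) while one
-- countdown loop accumulates the alternating sum (alternative decomposition; no s!-sized big-ints are built).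

-- ===== PORT A =====
def solution (s : Int) (a : Int) (b : Int) (c : Int) : Int :=
  if s > a + b + c then 0
  else
    let f0 := List.replicate (s + 1).toNat (1 : Int)
    let f := (PySem.List.pyRange 2 (s + 1) 1).foldl
      (fun f i => PySem.List.pySetD f i (i * PySem.List.pyGetD f (i - 1) 0)) f0
    let comb := fun (n r : Int) =>
      PySem.Int.floordiv (PySem.Int.floordiv (PySem.List.pyGetD f n 0)
        (PySem.List.pyGetD f r 0)) (PySem.List.pyGetD f (n - r) 0)
    let dp0 := List.replicate (s + 1).toNat (0 : Int)
    let dp := (PySem.List.pyRange (s - max a (max b c)) 0 (-1)).foldl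
      (fun dp i =>
        let j := s - i
        let dp := PySem.List.pySetD dp i (PySem.List.pyGetD dp i 0 + comb j a)
        let dp := PySem.List.pySetD dp i (PySem.List.pyGetD dp i 0 * comb j b)
        let dp := PySem.List.pySetD dp i (PySem.List.pyGetD dp i 0 * comb j c)
        let dp := PySem.List.pySetD dp i (PySem.List.pyGetD dp i 0 * comb s j)
        PySem.List.pySetD dp i (PySem.List.pyGetD dp i 0 - PySem.List.pyGetD dp (i + 1) 0)) dp0
    let answer := comb s a * comb s b * comb s c
    let answer := answer - PySem.List.pyGetD dp 1 0
    PySem.Int.mod answer 1000000007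

-- ===== PORT B =====
-- the while loop of Source B; the 'j ≤ m' stopping test is Python's 'j == m' break made total
-- (under Pre_ the loop reaches j = m exactly)
def solLoop (s a b c m cs ca cb cc total sign j : Int) : Int :=
  let total := total + sign * cs * ca * cb * cc
  if j ≤ m then total
  else
    solLoop s a b c m
      (PySem.Int.floordiv (cs * j) (s - j + 1))
      (PySem.Int.floordiv (ca * (j - a)) j)
      (PySem.Int.floordiv (cb * (j - b)) j)
      (PySem.Int.floordiv (cc * (j - c)) j)
      total (-sign) (j - 1)
termination_by (j - m).toNat
decreasing_by omega

def solution_alt (s : Int) (a : Int) (b : Int) (c : Int) : Int :=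
  if s > a + b + c then 0
  else
    let m := max a (max b c)
    let ca := (PySem.List.pyRange 0 a 1).foldl
      (fun ca t => PySem.Int.floordiv (ca * (s - t)) (t + 1)) 1
    let cb := (PySem.List.pyRange 0 b 1).foldl
      (fun cb t => PySem.Int.floordiv (cb * (s - t)) (t + 1)) 1
    let cc := (PySem.List.pyRange 0 c 1).foldl
      (fun cc t => PySem.Int.floordiv (cc * (s - t)) (t + 1)) 1
    PySem.Int.mod (solLoop s a b c m 1 ca cb cc 0 1 s) 1000000007

-- ===== PRECONDITION & SPEC =====
-- Pre_ is exactly the set of inputs on which the Python A returns (elsewhere it raises IndexError):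
-- either the early-exit branch s > a+b+c, or a well-formed instance 1 ≤ s with 0 ≤ a,b,c ≤ s.
def Pre_solution (s : Int) (a : Int) (b : Int) (c : Int) : Prop :=
  s > a + b + c ∨ (1 ≤ s ∧ 0 ≤ a ∧ a ≤ s ∧ 0 ≤ b ∧ b ≤ s ∧ 0 ≤ c ∧ c ≤ s)
instance (s : Int) (a : Int) (b : Int) (c : Int) : Decidable (Pre_solution s a b c) := by
  unfold Pre_solution; infer_instance

def pvWitness_solution : Int × Int × Int × Int := (4, 2, 1, 2)

def Spec_solution (s : Int) (a : Int) (b : Int) (c : Int) (out : Int) : Prop := out = solution_alt s a b c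
instance (s : Int) (a : Int) (b : Int) (c : Int) (out : Int) : Decidable (Spec_solution s a b c out) := by
  unfold Spec_solution; infer_instance

-- ===== CLAIM (what is proved, stated in full; the proofs are below) =====
def Claim_equal_solution : Prop := ∀ (s : Int) (a : Int) (b : Int) (c : Int),
  Dom_solution s a b c → Pre_solution s a b c → Spec_solution s a b c (solution s a b c)

-- ===== LEMMAS AND PROOFS =====

-- the common term:  T i = C(S, S-i) * C(S-i, A) * C(S-i, B) * C(S-i, C)  (as an Int)
def pvT (S A B C : Nat) (i : Nat) : Int :=
  (Nat.choose S (S - i) * Nat.choose (S - i) A * Nat.choose (S - i) B * Nat.choose (S - i) C : Nat)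

-- signed term (+ at even i)
def pvSgn (S A B C : Nat) (i : Nat) : Int :=
  if i % 2 = 0 then pvT S A B C i else -pvT S A B C i

-- alternating tail sum: altTail t = (-1)^t * Σ_{i=t}^{SM} (-1)^i T i
def pvAlt (S A B C SM t : Nat) : Int :=
  (-1) ^ t * ((List.range (SM + 1 - t)).map (fun k => pvSgn S A B C (t + k))).sum

theorem pvAlt_top (S A B C SM : Nat) : pvAlt S A B C SM (SM + 1) = 0 := by
  simp [pvAlt]

theorem pvSgn_eq (S A B C t : Nat) : (-1 : Int) ^ t * pvSgn S A B C t = pvT S A B C t := by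
  rcases Nat.even_or_odd t with h | h
  · simp [pvSgn, Nat.even_iff.mp h, h.neg_one_pow]
  · simp [pvSgn, Nat.odd_iff.mp h, h.neg_one_pow]

theorem pvAlt_rec (S A B C SM t : Nat) (ht : t ≤ SM) :
    pvAlt S A B C SM t = pvT S A B C t - pvAlt S A B C SM (t + 1) := by
  have h1 : SM + 1 - t = (SM - t) + 1 := by omega
  have h2 : SM + 1 - (t + 1) = SM - t := by omega
  rw [pvAlt, pvAlt, h1, h2, List.range_succ_eq_map]
  simp only [List.map_cons, List.map_map, List.sum_cons]
  have h3 : ((List.range (SM - t)).map ((fun k => pvSgn S A B C (t + k)) ∘ (· + 1))).sum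
      = ((List.range (SM - t)).map (fun k => pvSgn S A B C (t + 1 + k))).sum := by
    congr 1; apply List.map_congr_left; intro k _; simp [Function.comp]; ring_nf
  rw [h3]
  have := pvSgn_eq S A B C t
  have hp : (-1 : Int) ^ (t + 1) = -((-1 : Int) ^ t) := by ring
  rw [hp]
  simp only [Nat.add_zero]
  linear_combination this

-- factorial division is exact:  n! / r! / (n-r)! = C(n,r)
theorem fact_div_choose (n r : Nat) (h : r ≤ n) :
    n.factorial / r.factorial / (n - r).factorial = n.choose r := by
  have key := Nat.choose_mul_factorial_mul_factorial h
  have h1 : n.factorial / r.factorial = n.choose r * (n - r).factorial := by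
    rw [← key]
    rw [show n.choose r * r.factorial * (n - r).factorial
        = (n.choose r * (n - r).factorial) * r.factorial by ring]
    exact Nat.mul_div_cancel _ (Nat.factorial_pos r)
  rw [h1, Nat.mul_div_cancel _ (Nat.factorial_pos (n - r))]

-- reading the factorial table
theorem getD_fact (S k : Nat) (h : k ≤ S) :
    ((List.range (S + 1)).map (fun k => ((Nat.factorial k : Nat) : Int))).getD k 0
      = (k.factorial : Int) := by
  rw [List.getD_eq_getElem?_getD, List.getElem?_map, List.getElem?_range (by omega)]
  rfl

-- A's factorial-table loop builds [0!, 1!, …, S!]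
theorem fact_aux (S : Nat) (hS : 1 ≤ S) : ∀ (n : Nat), n ≤ S - 1 →
    (PySem.List.pyRange 2 (2 + (n : Int)) 1).foldl
      (fun f i => PySem.List.pySetD f i (i * PySem.List.pyGetD f (i - 1) 0))
      (List.replicate (S + 1) (1 : Int))
    = (List.range (2 + n)).map (fun k => ((Nat.factorial k : Nat) : Int))
        ++ List.replicate (S - 1 - n) (1 : Int) := by
  intro n hn
  induction n with
  | zero =>
    rw [show (2 + (0:Nat) : Int) = 2 by norm_num, PySem.List.pyRange_one_eq_nil (by omega)]
    have h1 : S + 1 = (S - 1) + 1 + 1 := by omega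
    rw [h1]
    simp [List.replicate_succ, List.range_succ, Nat.factorial]
  | succ n ih =>
    have hn' : n ≤ S - 1 := by omega
    have ih := ih hn'
    have hsplit : PySem.List.pyRange 2 (2 + ((n+1 : Nat) : Int)) 1
        = PySem.List.pyRange 2 (2 + (n : Int)) 1 ++ [2 + (n : Int)] := by
      rw [show (2 + ((n+1 : Nat) : Int)) = (2 + (n:Int)) + 1 by push_cast; ring]
      exact PySem.List.pyRange_one_succ_right (by omega)
    rw [hsplit, List.foldl_append, ih]
    simp only [List.foldl_cons, List.foldl_nil]
    have hcast : (2 + (n:Int)) = ((2 + n : Nat) : Int) := by push_cast; ring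
    have hcast1 : (2 + (n:Int)) - 1 = ((n + 1 : Nat) : Int) := by push_cast; ring
    rw [hcast1, hcast, PySem.List.pyGetD_natCast, PySem.List.pySetD_natCast]
    set F := (List.range (2 + n)).map (fun k => ((Nat.factorial k : Nat) : Int)) with hF
    have hlenF : F.length = 2 + n := by simp [hF]
    have hread : (F ++ List.replicate (S - 1 - n) (1:Int)).getD (n+1) 0 = ((n+1).factorial : Int) := by
      rw [List.getD_eq_getElem?_getD, List.getElem?_append, if_pos (by omega)]
      rw [← List.getD_eq_getElem?_getD]
      rw [hF]
      rw [List.getD_eq_getElem?_getD, List.getElem?_map, List.getElem?_range (by omega)]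
      rfl
    rw [hread]
    rw [List.set_append_right _ _ (by omega)]
    have hidx : 2 + n - F.length = 0 := by omega
    rw [hidx]
    have hrep : (List.replicate (S - 1 - n) (1:Int)) = 1 :: List.replicate (S - 1 - (n+1)) 1 := by
      rw [show S - 1 - n = (S - 1 - (n+1)) + 1 by omega, List.replicate_succ]
    rw [hrep, List.set_cons_zero]
    have hvalN : (2 + n) * (n+1).factorial = (2+n).factorial := by
      rw [show (2 + n) = (n+1) + 1 by ring]
      simp [Nat.factorial_succ]
    have hval : ((2 + n : Nat) : Int) * ((n+1).factorial : Int) = (((2+n).factorial : Nat) : Int) := by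
      exact_mod_cast hvalN
    rw [hval]
    rw [show (2 + (n+1)) = (2 + n) + 1 by ring, List.range_succ, List.map_append]
    simp [hF]

theorem fact_table (S : Nat) (hS : 1 ≤ S) :
    (PySem.List.pyRange 2 ((S : Int) + 1) 1).foldl
      (fun f i => PySem.List.pySetD f i (i * PySem.List.pyGetD f (i - 1) 0))
      (List.replicate (S + 1) (1 : Int))
    = (List.range (S + 1)).map (fun k => ((Nat.factorial k : Nat) : Int)) := by
  have h := fact_aux S hS (S - 1) (le_refl _)
  rw [show (2 + ((S - 1 : Nat) : Int)) = (S : Int) + 1 by omega] at h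
  rw [h, show (2 + (S - 1)) = S + 1 by omega]
  simp

-- A's comb, read from the factorial table, is the binomial coefficient
theorem combA_eq (S n r : Nat) (hr : r ≤ n) (hn : n ≤ S) :
    PySem.Int.floordiv (PySem.Int.floordiv
        (PySem.List.pyGetD ((List.range (S + 1)).map (fun k => ((Nat.factorial k : Nat) : Int))) (n : Int) 0)
        (PySem.List.pyGetD ((List.range (S + 1)).map (fun k => ((Nat.factorial k : Nat) : Int))) (r : Int) 0))
        (PySem.List.pyGetD ((List.range (S + 1)).map (fun k => ((Nat.factorial k : Nat) : Int))) ((n : Int) - (r : Int)) 0)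
      = (n.choose r : Int) := by
  rw [show (n : Int) - (r : Int) = ((n - r : Nat) : Int) by omega]
  rw [PySem.List.pyGetD_natCast, PySem.List.pyGetD_natCast, PySem.List.pyGetD_natCast]
  rw [getD_fact S n hn, getD_fact S r (by omega), getD_fact S (n - r) (by omega)]
  rw [PySem.Int.floordiv_natCast, PySem.Int.floordiv_natCast, fact_div_choose n r hr]

theorem getD_set_self (xs : List Int) (n : Nat) (v d : Int) (hn : n < xs.length) :
    (xs.set n v).getD n d = v := by
  rw [List.getD_eq_getElem?_getD]
  simp [hn]

theorem getD_set_ne (xs : List Int) (n m : Nat) (v d : Int) (hm : m ≠ n) :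
    (xs.set n v).getD m d = xs.getD m d := by
  rw [List.getD_eq_getElem?_getD, List.getElem?_set_ne (by omega), ← List.getD_eq_getElem?_getD]

theorem getD_replicate (n k : Nat) : (List.replicate n (0 : Int)).getD k 0 = 0 := by
  rw [List.getD_eq_getElem?_getD, List.getElem?_replicate]
  split <;> rfl

-- A's backward dp loop: dp[1] ends up as the alternating tail sum pvAlt … 1
theorem dp_loop (S A B C SM : Nat) (step : List Int → Int → List Int)
    (hSM : SM < S + 1) :
    ∀ (t : Nat) (dp : List Int), t ≤ SM → dp.length = S + 1 →
      (∀ k, k ≤ t → dp.getD k 0 = 0) →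
      dp.getD (t + 1) 0 = pvAlt S A B C SM (t + 1) →
      (∀ (dp' : List Int) (t' : Nat), 1 ≤ t' → t' ≤ SM → dp'.length = S + 1 →
        dp'.getD t' 0 = 0 →
        step dp' (t' : Int) = dp'.set t' (pvT S A B C t' - dp'.getD (t' + 1) 0)) →
      ((PySem.List.pyRange (t : Int) 0 (-1)).foldl step dp).getD 1 0 = pvAlt S A B C SM 1 := by
  intro t
  induction t with
  | zero =>
    intro dp _ _ _ hnext _
    rw [PySem.List.pyRange_neg_one_eq_nil (by omega)]
    simpa using hnext
  | succ t ih =>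
    intro dp htSM hlen hzero hnext hstep
    rw [PySem.List.pyRange_neg_one_cons (by positivity)]
    rw [show ((t + 1 : Nat) : Int) - 1 = (t : Int) by push_cast; ring]
    simp only [List.foldl_cons]
    rw [hstep dp (t + 1) (by omega) htSM hlen (hzero (t + 1) (le_refl _))]
    rw [show dp.getD (t + 1 + 1) 0 = pvAlt S A B C SM (t + 2) from hnext]
    rw [← pvAlt_rec S A B C SM (t + 1) htSM]
    apply ih
    · omega
    · simp [hlen]
    · intro k hk
      rw [getD_set_ne dp (t + 1) k _ 0 (by omega)]
      exact hzero k (by omega)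
    · exact getD_set_self dp (t + 1) _ 0 (by omega)
    · exact hstep

-- ===== B-side lemmas =====

-- exact division step for C(s, j) → C(s, j-1)
theorem choose_step_s (s j : Nat) (h1 : 1 ≤ j) (hj : j ≤ s) :
    Nat.choose s j * j / (s - j + 1) = Nat.choose s (j - 1) := by
  have h := Nat.choose_succ_right_eq s (j - 1)
  rw [show j - 1 + 1 = j by omega] at h
  rw [show s - (j - 1) = s - j + 1 by omega] at h
  rw [h, Nat.mul_div_cancel _ (by omega)]

-- exact division step for C(j, a) → C(j-1, a)
theorem choose_step_j (j a : Nat) (h1 : 1 ≤ j) (ha : a ≤ j - 1) :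
    Nat.choose j a * (j - a) / j = Nat.choose (j - 1) a := by
  obtain ⟨p, rfl⟩ : ∃ p, j = p + 1 := ⟨j - 1, by omega⟩
  simp only [Nat.add_sub_cancel] at ha ⊢
  have key : Nat.choose (p + 1) a * (p + 1 - a) = Nat.choose p a * (p + 1) := by
    have hpos : 0 < a.factorial * (p - a).factorial := by positivity
    apply Nat.eq_of_mul_eq_mul_right hpos
    have e2 : (p + 1 - a) * (p - a).factorial = (p + 1 - a).factorial := by
      rw [show p + 1 - a = (p - a) + 1 by omega, Nat.factorial_succ]
    calc Nat.choose (p + 1) a * (p + 1 - a) * (a.factorial * (p - a).factorial)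
        = Nat.choose (p + 1) a * a.factorial * ((p + 1 - a) * (p - a).factorial) := by ring
      _ = Nat.choose (p + 1) a * a.factorial * (p + 1 - a).factorial := by rw [e2]
      _ = (p + 1).factorial := Nat.choose_mul_factorial_mul_factorial (by omega)
      _ = (p + 1) * p.factorial := Nat.factorial_succ p
      _ = (p + 1) * (Nat.choose p a * a.factorial * (p - a).factorial) := by
            rw [Nat.choose_mul_factorial_mul_factorial ha]
      _ = Nat.choose p a * (p + 1) * (a.factorial * (p - a).factorial) := by ring
  rw [key, Nat.mul_div_cancel _ (by omega)]

-- B's multiplicative-initialisation fold computes C(S, R)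
theorem binom_fold (S R : Nat) : R ≤ S →
    (PySem.List.pyRange 0 (R : Int) 1).foldl
      (fun acc t => PySem.Int.floordiv (acc * ((S : Int) - t)) (t + 1)) 1
      = ((Nat.choose S R : Nat) : Int) := by
  rw [PySem.List.pyRange_zero_nat R]
  induction R with
  | zero => intro _; simp
  | succ r ih =>
    intro hR
    rw [List.range_succ, List.map_append, List.foldl_append, ih (by omega)]
    simp only [List.map_cons, List.map_nil, List.foldl_cons, List.foldl_nil]
    rw [show (S : Int) - (r : Nat) = ((S - r : Nat) : Int) by omega,
        show ((r : Nat) : Int) + 1 = ((r + 1 : Nat) : Int) by push_cast; ring,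
        show ((Nat.choose S r : Nat) : Int) * ((S - r : Nat) : Int)
          = ((Nat.choose S r * (S - r) : Nat) : Int) by push_cast; ring,
        PySem.Int.floordiv_natCast]
    rw [← Nat.choose_succ_right_eq, Nat.mul_div_cancel _ (by omega)]

-- B's countdown loop accumulates the alternating tail sum
theorem bloop (S A B C M : Nat) (hA : A ≤ M) (hB : B ≤ M) (hC : C ≤ M) (hMS : M ≤ S) :
    ∀ (n : Nat), M + n ≤ S → ∀ (total sign : Int),
    solLoop (S : Int) (A : Int) (B : Int) (C : Int) (M : Int)
      ((Nat.choose S (M + n) : Nat) : Int) ((Nat.choose (M + n) A : Nat) : Int)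
      ((Nat.choose (M + n) B : Nat) : Int) ((Nat.choose (M + n) C : Nat) : Int)
      total sign ((M + n : Nat) : Int)
    = total + sign * pvAlt S A B C (S - M) (S - M - n) := by
  intro n
  induction n with
  | zero =>
    intro _ total sign
    rw [solLoop]
    simp only [Nat.add_zero]
    rw [if_pos (le_refl ((M : Nat) : Int))]
    rw [show S - M - 0 = S - M by omega,
        pvAlt_rec S A B C (S - M) (S - M) (le_refl _), pvAlt_top]
    have hT : pvT S A B C (S - M)
        = ((Nat.choose S M * Nat.choose M A * Nat.choose M B * Nat.choose M C : Nat) : Int) := by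
      rw [pvT, show S - (S - M) = M by omega]
    rw [hT]
    push_cast
    ring
  | succ n ih =>
    intro hn total sign
    rw [solLoop]
    rw [if_neg (by
      push_cast
      omega)]
    -- the four exact-division updates
    rw [show ((Nat.choose S (M + (n+1)) : Nat) : Int) * ((M + (n+1) : Nat) : Int)
          = ((Nat.choose S (M + (n+1)) * (M + (n+1)) : Nat) : Int) by push_cast; ring,
        show (S : Int) - ((M + (n+1) : Nat) : Int) + 1 = ((S - (M + (n+1)) + 1 : Nat) : Int) by push_cast; omega,
        PySem.Int.floordiv_natCast,
        choose_step_s S (M + (n+1)) (by omega) hn,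
        show M + (n+1) - 1 = M + n by omega]
    rw [show ((M + (n+1) : Nat) : Int) - (A : Int) = ((M + (n+1) - A : Nat) : Int) by omega,
        show ((Nat.choose (M + (n+1)) A : Nat) : Int) * ((M + (n+1) - A : Nat) : Int)
          = ((Nat.choose (M + (n+1)) A * (M + (n+1) - A) : Nat) : Int) by push_cast; ring,
        PySem.Int.floordiv_natCast,
        choose_step_j (M + (n+1)) A (by omega) (by omega),
        show M + (n+1) - 1 = M + n by omega]
    rw [show ((M + (n+1) : Nat) : Int) - (B : Int) = ((M + (n+1) - B : Nat) : Int) by omega,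
        show ((Nat.choose (M + (n+1)) B : Nat) : Int) * ((M + (n+1) - B : Nat) : Int)
          = ((Nat.choose (M + (n+1)) B * (M + (n+1) - B) : Nat) : Int) by push_cast; ring,
        PySem.Int.floordiv_natCast,
        choose_step_j (M + (n+1)) B (by omega) (by omega),
        show M + (n+1) - 1 = M + n by omega]
    rw [show ((M + (n+1) : Nat) : Int) - (C : Int) = ((M + (n+1) - C : Nat) : Int) by omega,
        show ((Nat.choose (M + (n+1)) C : Nat) : Int) * ((M + (n+1) - C : Nat) : Int)
          = ((Nat.choose (M + (n+1)) C * (M + (n+1) - C) : Nat) : Int) by push_cast; ring,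
        PySem.Int.floordiv_natCast,
        choose_step_j (M + (n+1)) C (by omega) (by omega),
        show M + (n+1) - 1 = M + n by omega]
    rw [show ((M + (n+1) : Nat) : Int) - 1 = ((M + n : Nat) : Int) by push_cast; ring]
    rw [ih (by omega)]
    -- fold the new head term into the alternating sum
    have ht : S - M - (n+1) ≤ S - M := by omega
    rw [pvAlt_rec S A B C (S - M) (S - M - (n+1)) ht,
        show S - M - (n+1) + 1 = S - M - n by omega]
    have hT : pvT S A B C (S - M - (n+1))
        = ((Nat.choose S (M + (n+1)) * Nat.choose (M + (n+1)) A * Nat.choose (M + (n+1)) B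
            * Nat.choose (M + (n+1)) C : Nat) : Int) := by
      rw [pvT, show S - (S - M - (n+1)) = M + (n+1) by omega]
    rw [hT]
    push_cast
    ring

-- ===== VERDICT =====
theorem solution_spec : Claim_equal_solution := by
  intro s a b c hdom hpre
  unfold Spec_solution
  by_cases hgt : s > a + b + c
  · simp only [solution, solution_alt, if_pos hgt]
  · have hc : 1 ≤ s ∧ 0 ≤ a ∧ a ≤ s ∧ 0 ≤ b ∧ b ≤ s ∧ 0 ≤ c ∧ c ≤ s := by
      rcases hpre with h | h
      · omega
      · exact h
    obtain ⟨hs1, ha0, has, hb0, hbs, hc0, hcs⟩ := hc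
    obtain ⟨S, rfl⟩ : ∃ S : Nat, s = (S : Int) := ⟨s.toNat, (Int.toNat_of_nonneg (by omega)).symm⟩
    obtain ⟨A, rfl⟩ : ∃ A : Nat, a = (A : Int) := ⟨a.toNat, (Int.toNat_of_nonneg (by omega)).symm⟩
    obtain ⟨B, rfl⟩ : ∃ B : Nat, b = (B : Int) := ⟨b.toNat, (Int.toNat_of_nonneg (by omega)).symm⟩
    obtain ⟨C, rfl⟩ : ∃ C : Nat, c = (C : Int) := ⟨c.toNat, (Int.toNat_of_nonneg (by omega)).symm⟩
    have hS1 : 1 ≤ S := by exact_mod_cast hs1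
    have hAS : A ≤ S := by exact_mod_cast has
    have hBS : B ≤ S := by exact_mod_cast hbs
    have hCS : C ≤ S := by exact_mod_cast hcs
    set M := max A (max B C) with hM
    have hAM : A ≤ M := le_max_left _ _
    have hBM : B ≤ M := le_trans (le_max_left B C) (le_max_right _ _)
    have hCM : C ≤ M := le_trans (le_max_right B C) (le_max_right _ _)
    have hMS : M ≤ S := max_le hAS (max_le hBS hCS)
    set SM := S - M with hSM
    have hmaxcast : max (A : Int) (max (B : Int) (C : Int)) = ((M : Nat) : Int) := by
      rw [hM]; push_cast; rfl
    -- A's value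
    have hAval : solution (S : Int) (A : Int) (B : Int) (C : Int)
        = PySem.Int.mod (pvAlt S A B C SM 0) 1000000007 := by
      simp only [solution, if_neg hgt]
      rw [show ((S : Int) + 1).toNat = S + 1 by omega]
      rw [fact_table S hS1]
      rw [hmaxcast]
      rw [show (S : Int) - ((M : Nat) : Int) = ((SM : Nat) : Int) by omega]
      rw [PySem.List.pyGetD_ofNat']
      rw [dp_loop S A B C SM _ (by omega) SM (List.replicate (S + 1) 0) (le_refl _) (by simp)
        (fun k _ => getD_replicate _ _) (by rw [getD_replicate, pvAlt_top])]
      · congr 1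
        rw [combA_eq S S A hAS (le_refl _), combA_eq S S B hBS (le_refl _),
          combA_eq S S C hCS (le_refl _), pvAlt_rec S A B C SM 0 (Nat.zero_le _)]
        simp [pvT]
      · intro dp t h1t htSM hlen h0
        rw [show (S : Int) - (t : Nat) = ((S - t : Nat) : Int) by omega]
        rw [show ((t : Nat) : Int) + 1 = ((t + 1 : Nat) : Int) by push_cast; ring]
        rw [combA_eq S (S - t) A (by omega) (by omega), combA_eq S (S - t) B (by omega) (by omega),
          combA_eq S (S - t) C (by omega) (by omega), combA_eq S S (S - t) (by omega) (le_refl _)]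
        simp only [PySem.List.pySetD_natCast, PySem.List.pyGetD_natCast]
        have hlt : t < dp.length := by omega
        simp only [List.set_set, getD_set_self _ _ _ _ hlt, getD_set_ne dp t (t + 1) _ 0 (by omega), h0]
        congr 1
        rw [pvT]
        push_cast
        ring
    -- B's value
    have hBval : solution_alt (S : Int) (A : Int) (B : Int) (C : Int)
        = PySem.Int.mod (pvAlt S A B C SM 0) 1000000007 := by
      simp only [solution_alt, if_neg hgt]
      rw [hmaxcast]
      rw [binom_fold S A hAS, binom_fold S B hBS, binom_fold S C hCS]
      have hb := bloop S A B C M hAM hBM hCM hMS (S - M) (by omega) 0 1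
      rw [show M + (S - M) = S by omega, Nat.choose_self, Nat.cast_one,
          show S - M - (S - M) = 0 by omega] at hb
      rw [hb]
      congr 1
      rw [hSM]
      ring
    rw [hAval, hBval]
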